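-- pv_equiv track=rewrite | github.com/Sapai-Solutions/chatbot-poc | backend/app/routers/knowledge_base.py | _break_long_tokens
-- ===== SOURCE A (Python) =====
-- def _break_long_tokens(text: str, max_len: int = 80) -> str:
--     """Insert line-breaks into tokens longer than max_len so fpdf2 never overflows a cell."""
--     parts = []
--     for word in text.split(" "):
--         while len(word) > max_len:
--             parts.append(word[:max_len])
--             word = word[max_len:]
--         parts.append(word)
--     return " ".join(parts)
-- ===== SOURCE B (Python) =====
-- def _break_long_tokens(text: str, max_len: int = 80) -> str:
--     """Insert line-breaks into tokens longer than max_len so fpdf2 never overflows a cell.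
--
--     Single left-to-right pass over the characters with a run-length counter,
--     instead of split/while-chunking/join."""
--     out = []
--     run = 0
--     for ch in text:
--         if ch == ' ':
--             run = 0
--         else:
--             if run == max_len:
--                 out.append(' ')
--                 run = 0
--             run += 1
--         out.append(ch)
--     return ''.join(out)
-- ===== Notes on version B (the rewrite author's own statement) =====
-- stated objective: alternative
-- what changed: Replaces split-on-space + per-word while-loop slicing + join with one single left-to-right character scan that keeps a run-length counter and emits a space whenever max_len consecutive non-space characters are followed by another non-space character.
-- outside the precondition, e.g. on _break_long_tokens('', 0): A returns '', B returns ''; on _break_long_tokens('  ', 0): A returns '  ', B returns '  '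
import Mathlib
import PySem

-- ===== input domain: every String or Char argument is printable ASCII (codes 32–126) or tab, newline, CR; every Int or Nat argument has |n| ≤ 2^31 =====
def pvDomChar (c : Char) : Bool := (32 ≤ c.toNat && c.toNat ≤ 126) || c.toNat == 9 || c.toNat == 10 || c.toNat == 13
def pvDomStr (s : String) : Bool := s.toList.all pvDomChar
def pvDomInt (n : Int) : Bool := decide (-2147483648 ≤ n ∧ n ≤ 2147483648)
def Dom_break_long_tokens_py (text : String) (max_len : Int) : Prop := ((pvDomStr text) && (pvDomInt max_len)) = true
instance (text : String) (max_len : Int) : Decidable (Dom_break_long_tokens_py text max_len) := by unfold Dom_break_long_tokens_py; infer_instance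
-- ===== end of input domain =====

-- B replaces A's split/while-chunk/join with a single character scan keeping a run-length counter (alternative algorithm, same result on Pre_).


-- ===== PORT A =====
-- A's inner while loop: while len(word) > max_len: parts.append(word[:max_len]); word = word[max_len:].
-- fuel = the word's length bounds the number of iterations whenever max_len ≥ 1 (Pre_); for max_len ≤ 0 Python diverges.
def aChunk (max_len : Int) : Nat → List Char → List (List Char) → List (List Char)
  | 0, word, parts => parts ++ [word]
  | fuel+1, word, parts =>
    if (word.length : Int) > max_len then
      aChunk max_len fuel (PySem.List.slice word (some max_len) none)
        (parts ++ [PySem.List.slice word none (some max_len)])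
    else parts ++ [word]

def break_long_tokens_py (text : String) (max_len : Int) : String :=
  let parts := (PySem.Chars.splitOn text.toList [' ']).foldl
      (fun parts word => aChunk max_len word.length word parts) []
  String.mk (PySem.Chars.join [' '] parts)

-- ===== PORT B =====
-- B's single pass: run counts consecutive non-space characters; when run reaches max_len and
-- another non-space character follows, emit one ' ' and restart the count at that character.
def bScan (max_len : Int) : List Char → Int → List Char
  | [], _ => []
  | c :: cs, run =>
    if c = ' ' then c :: bScan max_len cs 0
    else if run = max_len then ' ' :: c :: bScan max_len cs 1
    else c :: bScan max_len cs (run + 1)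

def break_long_tokens_py_alt (text : String) (max_len : Int) : String :=
  String.mk (bScan max_len text.toList 0)

-- ===== PRECONDITION & SPEC =====
-- Pre_ excludes max_len ≤ 0: there A's while loop diverges on every word (even the empty word when
-- max_len < 0; for max_len = 0 A returns only on all-space texts, where B returns the same string).
def Pre_break_long_tokens_py (text : String) (max_len : Int) : Prop := 1 ≤ max_len
instance (text : String) (max_len : Int) : Decidable (Pre_break_long_tokens_py text max_len) := by
  unfold Pre_break_long_tokens_py; infer_instance

def pvWitness_break_long_tokens_py : String × Int := ("abcde fg", 2)

def Spec_break_long_tokens_py (text : String) (max_len : Int) (out : String) : Prop := out = break_long_tokens_py_alt text max_len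
instance (text : String) (max_len : Int) (out : String) : Decidable (Spec_break_long_tokens_py text max_len out) := by unfold Spec_break_long_tokens_py; infer_instance

-- ===== CLAIM (what is proved, stated in full; the proofs are below) =====
def Claim_equal_break_long_tokens_py : Prop := ∀ (text : String) (max_len : Int), Dom_break_long_tokens_py text max_len → Pre_break_long_tokens_py text max_len → Spec_break_long_tokens_py text max_len (break_long_tokens_py text max_len)

-- ===== LEMMAS AND PROOFS =====

-- Structural model of text.split(" "): list of the ' '-separated pieces.
def mySplit : List Char → List (List Char)
  | [] => [[]]
  | c :: cs => if c = ' ' then [] :: mySplit cs else (mySplit cs).modifyHead (c :: ·)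

theorem mySplit_ne_nil (cs : List Char) : mySplit cs ≠ [] := by
  induction cs with
  | nil => simp [mySplit]
  | cons c cs ih =>
    by_cases h : c = ' ' <;> simp [mySplit, h]
    cases hm : mySplit cs with
    | nil => exact absurd hm ih
    | cons w ws => simp [List.modifyHead]

theorem go_spec : ∀ (fuel : Nat) (l cur : List Char) (acc : List (List Char)),
    l.length < fuel →
    PySem.Chars.splitOn.go [' '] fuel l cur acc
      = acc.reverse ++ (mySplit l).modifyHead (cur.reverse ++ ·) := by
  intro fuel
  induction fuel with
  | zero => intro l cur acc h; omega
  | succ fuel ih =>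
    intro l cur acc h
    cases l with
    | nil => simp [PySem.Chars.splitOn.go, mySplit]
    | cons c rest =>
      by_cases hc : c = ' '
      · subst hc
        have hpre : [' '].isPrefixOf (' ' :: rest) = true := by
          simp [List.isPrefixOf]
        rw [show PySem.Chars.splitOn.go [' '] (fuel+1) (' ' :: rest) cur acc
              = PySem.Chars.splitOn.go [' '] fuel (List.drop 1 (' ' :: rest)) [] (cur.reverse :: acc) by
            simp [PySem.Chars.splitOn.go, hpre]]
        rw [ih _ _ _ (by simpa using Nat.lt_of_succ_lt_succ h)]
        cases hm : mySplit rest with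
        | nil => exact absurd hm (mySplit_ne_nil rest)
        | cons w ws => simp [mySplit, hm]
      · have hpre : [' '].isPrefixOf (c :: rest) = false := by
          simp [List.isPrefixOf]
          exact fun h => absurd h.symm hc
        rw [show PySem.Chars.splitOn.go [' '] (fuel+1) (c :: rest) cur acc
              = PySem.Chars.splitOn.go [' '] fuel rest (c :: cur) acc by
            simp [PySem.Chars.splitOn.go, hpre]]
        rw [ih _ _ _ (by simpa using Nat.lt_of_succ_lt_succ h)]
        cases hm : mySplit rest with
        | nil => exact absurd hm (mySplit_ne_nil rest)
        | cons w ws => simp [mySplit, hc, hm, List.modifyHead]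

theorem splitOn_eq (cs : List Char) : PySem.Chars.splitOn cs [' '] = mySplit cs := by
  have := go_spec (cs.length + 1) cs [] [] (by omega)
  cases hm : mySplit cs with
  | nil => exact absurd hm (mySplit_ne_nil cs)
  | cons w ws => simpa [PySem.Chars.splitOn, hm, List.modifyHead] using this

theorem mySplit_no_space (cs : List Char) : ∀ w ∈ mySplit cs, ∀ c ∈ w, c ≠ ' ' := by
  induction cs with
  | nil => simp [mySplit]
  | cons c cs ih =>
    by_cases h : c = ' '
    · simp [mySplit, h]
      intro w hw; exact ih w hw
    · simp [mySplit, h]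
      cases hm : mySplit cs with
      | nil => exact absurd hm (mySplit_ne_nil cs)
      | cons w ws =>
        simp [List.modifyHead]
        refine ⟨⟨h, ?_⟩, ?_⟩
        · exact ih w (by simp [hm])
        · intro v hv; exact ih v (by simp [hm, hv])

theorem join_cons_ne_nil {w : List Char} {ws : List (List Char)} (h : ws ≠ []) :
    PySem.Chars.join [' '] (w :: ws) = w ++ ' ' :: PySem.Chars.join [' '] ws := by
  cases ws with
  | nil => exact absurd rfl h
  | cons w2 ws' => simp [PySem.Chars.join_cons_cons]

theorem join_mySplit (cs : List Char) : PySem.Chars.join [' '] (mySplit cs) = cs := by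
  induction cs with
  | nil => simp [mySplit, PySem.Chars.join_singleton]
  | cons c cs ih =>
    by_cases h : c = ' '
    · subst h
      rw [show mySplit (' ' :: cs) = [] :: mySplit cs by simp [mySplit]]
      rw [join_cons_ne_nil (mySplit_ne_nil cs), ih]
      simp
    · rw [show mySplit (c :: cs) = (mySplit cs).modifyHead (c :: ·) by simp [mySplit, h]]
      cases hm : mySplit cs with
      | nil => exact absurd hm (mySplit_ne_nil cs)
      | cons w ws =>
        rw [hm] at ih
        cases ws with
        | nil => simpa [List.modifyHead, PySem.Chars.join_singleton] using congrArg (c :: ·) ih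
        | cons w2 ws' =>
          rw [List.modifyHead]
          rw [join_cons_ne_nil (by simp)] at ih ⊢
          simpa using congrArg (c :: ·) ih

-- accumulator lemma for aChunk
theorem aChunk_acc (m : Int) : ∀ (fuel : Nat) (word : List Char) (parts : List (List Char)),
    aChunk m fuel word parts = parts ++ aChunk m fuel word [] := by
  intro fuel
  induction fuel with
  | zero => intro word parts; simp [aChunk]
  | succ fuel ih =>
    intro word parts
    by_cases h : (word.length : Int) > m
    · simp only [aChunk, if_pos h]
      rw [ih _ (parts ++ _), ih _ ([] ++ _)]
      simp
    · simp [aChunk, h]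

theorem aChunk_ne_nil (m : Int) : ∀ (fuel : Nat) (word : List Char) (parts : List (List Char)),
    aChunk m fuel word parts ≠ [] := by
  intro fuel
  induction fuel with
  | zero => intro word parts; simp [aChunk]
  | succ fuel ih =>
    intro word parts
    by_cases h : (word.length : Int) > m <;> simp [aChunk, h]
    exact ih _ _

theorem slice_to_toNat (w : List Char) (m : Int) (hm : 1 ≤ m) :
    PySem.List.slice w none (some m) = w.take m.toNat := by
  conv_lhs => rw [← Int.toNat_of_nonneg (by omega : (0:Int) ≤ m)]
  rw [PySem.List.slice_to_natCast]

theorem slice_from_toNat (w : List Char) (m : Int) (hm : 1 ≤ m) :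
    PySem.List.slice w (some m) none = w.drop m.toNat := by
  conv_lhs => rw [← Int.toNat_of_nonneg (by omega : (0:Int) ≤ m)]
  rw [PySem.List.slice_from_natCast]

-- fuel invariance of aChunk for max_len ≥ 1
theorem aChunk_fuel (m : Int) (hm : 1 ≤ m) : ∀ (n : Nat) (word : List Char), word.length = n →
    ∀ fuel, n ≤ fuel → aChunk m fuel word [] = aChunk m n word [] := by
  intro n
  induction n using Nat.strong_induction_on with
  | _ n ih =>
    intro word hlen fuel hfuel
    by_cases h : (word.length : Int) > m
    · have hn1 : 1 ≤ n := by omega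
      obtain ⟨k, rfl⟩ : ∃ k, n = k + 1 := ⟨n - 1, by omega⟩
      obtain ⟨f, rfl⟩ : ∃ f, fuel = f + 1 := ⟨fuel - 1, by omega⟩
      simp only [aChunk, if_pos h]
      rw [aChunk_acc m f, aChunk_acc m k]
      have hd : (PySem.List.slice word (some m) none).length = word.length - m.toNat := by
        rw [slice_from_toNat word m hm]; simp
      have hlt : word.length - m.toNat < k + 1 := by omega
      have e1 := ih (word.length - m.toNat) hlt _ hd f (by omega)
      have e2 := ih (word.length - m.toNat) hlt _ hd k (by omega)
      rw [e1, e2]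
    · cases fuel <;> cases n <;> simp [aChunk, h]

theorem aChunk_le (m : Int) (w : List Char) (h : ¬ (w.length : Int) > m) :
    aChunk m w.length w [] = [w] := by
  rcases hl : w.length with _ | k <;> simp [aChunk, h]

theorem aChunk_gt (m : Int) (hm : 1 ≤ m) (w : List Char) (h : (w.length : Int) > m) :
    aChunk m w.length w []
      = w.take m.toNat :: aChunk m (w.drop m.toNat).length (w.drop m.toNat) [] := by
  obtain ⟨k, hk⟩ : ∃ k, w.length = k + 1 := ⟨w.length - 1, by omega⟩
  rw [hk]
  simp only [aChunk, if_pos h]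
  rw [aChunk_acc m k, slice_to_toNat w m hm, slice_from_toNat w m hm]
  have hd : (w.drop m.toNat).length = w.length - m.toNat := by simp
  rw [aChunk_fuel m hm (w.drop m.toNat).length (w.drop m.toNat) rfl k (by omega)]
  simp

-- step lemma for bScan over a run of non-space characters that fits in the current chunk
theorem bScan_step (m : Int) : ∀ (u t : List Char) (run : Int),
    (∀ c ∈ u, c ≠ ' ') → 0 ≤ run → run + u.length ≤ m →
    bScan m (u ++ t) run = u ++ bScan m t (run + u.length) := by
  intro u
  induction u with
  | nil => intro t run _ _ _; simp
  | cons c u ih =>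
    intro t run hns h0 hle
    have hc : c ≠ ' ' := hns c (by simp)
    have hlen : (((c :: u).length : Nat) : Int) = (u.length : Int) + 1 := by simp
    rw [hlen] at hle
    have hpos : (0:Int) ≤ (u.length : Int) := by positivity
    have hrun : run ≠ m := by omega
    simp only [List.cons_append, bScan, if_neg hc, if_neg hrun]
    rw [ih t (run + 1) (fun d hd => hns d (by simp [hd])) (by omega) (by omega)]
    have harg : run + (((c :: u).length : Nat) : Int) = run + 1 + (u.length : Int) := by
      rw [hlen]; ring
    rw [harg]

theorem join_append {xs ys : List (List Char)} (h1 : xs ≠ []) (h2 : ys ≠ []) :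
    PySem.Chars.join [' '] (xs ++ ys)
      = PySem.Chars.join [' '] xs ++ ' ' :: PySem.Chars.join [' '] ys := by
  induction xs with
  | nil => exact absurd rfl h1
  | cons w xs ih =>
    cases xs with
    | nil => simpa [PySem.Chars.join_singleton] using join_cons_ne_nil (w := w) h2
    | cons w2 xs' =>
      have e1 : (w :: w2 :: xs') ++ ys = w :: ((w2 :: xs') ++ ys) := by simp
      rw [e1, join_cons_ne_nil (by simp), ih (by simp),
        join_cons_ne_nil (by simp : w2 :: xs' ≠ [])]
      simp

theorem word_scan (m : Int) (hm : 1 ≤ m) : ∀ (n : Nat) (w : List Char), w.length = n →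
    (∀ c ∈ w, c ≠ ' ') →
    (bScan m w 0 = PySem.Chars.join [' '] (aChunk m w.length w []) ∧
     ∀ t, bScan m (w ++ ' ' :: t) 0
        = PySem.Chars.join [' '] (aChunk m w.length w []) ++ ' ' :: bScan m t 0) := by
  intro n
  induction n using Nat.strong_induction_on with
  | _ n ih =>
    intro w hlen hns
    by_cases h : (w.length : Int) > m
    · have hmt : 1 ≤ m.toNat := by omega
      have hmtlen : m.toNat < w.length := by omega
      have htake : (w.take m.toNat).length = m.toNat := by simp; omega
      have hsplit : w = w.take m.toNat ++ w.drop m.toNat := (List.take_append_drop _ _).symm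
      obtain ⟨c, rest, hdrop⟩ : ∃ c rest, w.drop m.toNat = c :: rest := by
        cases hd : w.drop m.toNat with
        | nil => exfalso; have := congrArg List.length hd; simp at this; omega
        | cons c rest => exact ⟨c, rest, rfl⟩
      have hcw : c ∈ w := List.drop_subset m.toNat w (by rw [hdrop]; exact List.mem_cons_self ..)
      have hc : c ≠ ' ' := hns c hcw
      have hns_take : ∀ d ∈ w.take m.toNat, d ≠ ' ' := fun d hd => hns d (List.take_subset _ _ hd)
      have hns_drop : ∀ d ∈ w.drop m.toNat, d ≠ ' ' := fun d hd => hns d (List.drop_subset _ _ hd)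
      have key : ∀ x, bScan m (w ++ x) 0
          = w.take m.toNat ++ ' ' :: bScan m ((w.drop m.toNat) ++ x) 0 := by
        intro x
        conv_lhs => rw [hsplit, List.append_assoc]
        rw [bScan_step m (w.take m.toNat) _ 0 hns_take le_rfl (by rw [htake]; omega)]
        rw [show (0:Int) + ((w.take m.toNat).length : Int) = m by rw [htake]; omega]
        rw [hdrop]
        simp [bScan, hc, show (0:Int) ≠ m by omega]
      have hdl : (w.drop m.toNat).length < n := by simp; omega
      obtain ⟨ih1, ih2⟩ := ih (w.drop m.toNat).length hdl (w.drop m.toNat) rfl hns_drop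
      rw [aChunk_gt m hm w h, join_cons_ne_nil (aChunk_ne_nil m _ _ _)]
      constructor
      · have hk := key []
        rw [List.append_nil, List.append_nil] at hk
        rw [hk, ih1]
      · intro t
        have hk := key (' ' :: t)
        rw [hk, ih2 t]
        simp
    · rw [aChunk_le m w h, PySem.Chars.join_singleton]
      constructor
      · have hstep := bScan_step m w [] 0 hns le_rfl (by omega)
        simpa [bScan] using hstep
      · intro t
        rw [bScan_step m w (' ' :: t) 0 hns le_rfl (by omega)]
        simp [bScan]

theorem words_scan (m : Int) (hm : 1 ≤ m) : ∀ (ws : List (List Char)), ws ≠ [] →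
    (∀ w ∈ ws, ∀ c ∈ w, c ≠ ' ') →
    bScan m (PySem.Chars.join [' '] ws) 0
      = PySem.Chars.join [' '] (ws.flatMap (fun w => aChunk m w.length w [])) := by
  intro ws
  induction ws with
  | nil => intro h; exact absurd rfl h
  | cons w ws ih =>
    intro _ hns
    cases ws with
    | nil =>
      simp only [List.flatMap_cons, List.flatMap_nil, List.append_nil]
      rw [PySem.Chars.join_singleton]
      exact (word_scan m hm w.length w rfl (hns w (by simp))).1
    | cons w2 ws' =>
      have hfm : (w2 :: ws').flatMap (fun w => aChunk m w.length w []) ≠ [] := by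
        simp only [List.flatMap_cons]
        intro hnil
        rcases List.append_eq_nil_iff.mp hnil with ⟨h1, _⟩
        exact aChunk_ne_nil m _ _ _ h1
      rw [join_cons_ne_nil (by simp)]
      rw [(word_scan m hm w.length w rfl (hns w (by simp))).2]
      rw [ih (by simp) (fun v hv c hc => hns v (List.mem_cons_of_mem _ hv) c hc)]
      conv_rhs => rw [List.flatMap_cons]
      rw [join_append (aChunk_ne_nil m _ _ _) hfm]

theorem foldl_chunks (m : Int) (ws : List (List Char)) :
    ws.foldl (fun parts word => aChunk m word.length word parts) []
      = ws.flatMap (fun w => aChunk m w.length w []) := by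
  have h := PySem.List.foldl_congr_mem (l := ws) (init := ([] : List (List Char)))
      (f := fun parts word => aChunk m word.length word parts)
      (g := fun parts word => parts ++ aChunk m word.length word [])
      (fun acc x _ => aChunk_acc m x.length x acc)
  rw [h, PySem.List.foldl_append_eq_flatMap]
  simp

-- ===== VERDICT (by name: the statement is the Claim_ definition above) =====
theorem break_long_tokens_py_spec : Claim_equal_break_long_tokens_py := by
  unfold Claim_equal_break_long_tokens_py
  intro text m _ hpre
  unfold Pre_break_long_tokens_py at hpre
  unfold Spec_break_long_tokens_py
  simp only [break_long_tokens_py, break_long_tokens_py_alt, splitOn_eq, foldl_chunks]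
  congr 1
  rw [← words_scan m hpre _ (mySplit_ne_nil _) (mySplit_no_space _), join_mySplit]
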